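-- pv_equiv track=rewrite | github.com/quantmew/yoga-layout-python | example.py | longest_word_width
-- ===== SOURCE A (Python) =====
-- def longest_word_width(text, width_per_char):
--     max_length = 0
--     current_length = 0
--     for char in text:
--         if char == " ":
--             max_length = max(max_length, current_length)
--             current_length = 0
--         else:
--             current_length += 1
--     return max(max_length, current_length) * width_per_char
-- ===== SOURCE B (Python) =====
-- def longest_word_width(text, width_per_char):
--     return max((len(w) for w in text.split(' ')), default=0) * width_per_char
-- ===== Notes on version B (the rewrite author's own statement) =====
-- stated objective: simpler
-- what changed: Replaces the per-character two-counter state machine with tokenize-then-reduce: split on a single space and take the maximum token length.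
import Mathlib
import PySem

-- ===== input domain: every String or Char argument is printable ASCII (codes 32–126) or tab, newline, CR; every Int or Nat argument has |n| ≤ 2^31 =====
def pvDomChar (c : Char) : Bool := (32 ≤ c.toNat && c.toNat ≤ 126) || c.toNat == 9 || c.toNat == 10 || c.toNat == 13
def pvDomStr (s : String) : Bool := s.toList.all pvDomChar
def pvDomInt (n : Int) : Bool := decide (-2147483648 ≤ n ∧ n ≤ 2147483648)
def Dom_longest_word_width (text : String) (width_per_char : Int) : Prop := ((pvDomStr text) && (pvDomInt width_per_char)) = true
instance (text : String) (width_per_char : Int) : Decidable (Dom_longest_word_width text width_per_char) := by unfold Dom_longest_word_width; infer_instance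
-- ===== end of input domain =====

-- B replaces A's per-character two-counter state machine by split-on-space then max token length (same O(n) cost, simpler decomposition).


-- ===== PORT A =====
def longest_word_width (text : String) (width_per_char : Int) : Int :=
  let p := text.toList.foldl
    (fun (p : Int × Int) ch => if ch = ' ' then (max p.1 p.2, 0) else (p.1, p.2 + 1))
    (0, 0)
  max p.1 p.2 * width_per_char

-- ===== PORT B =====
-- max(gen, default=0): split(' ') always yields at least one token, token lengths are ≥ 0,
-- so the fold of max from 0 is exactly Python's max-with-default-0.
def longest_word_width_alt (text : String) (width_per_char : Int) : Int :=
  let words := PySem.Chars.splitOn text.toList [' ']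
  (words.map (fun w => (w.length : Int))).foldl max 0 * width_per_char

-- ===== PRECONDITION & SPEC =====
def Spec_longest_word_width (text : String) (width_per_char : Int) (out : Int) : Prop := out = longest_word_width_alt text width_per_char
instance (text : String) (width_per_char : Int) (out : Int) : Decidable (Spec_longest_word_width text width_per_char out) := by unfold Spec_longest_word_width; infer_instance

-- ===== CLAIM (what is proved, stated in full; the proofs are below) =====
def Claim_equal_longest_word_width : Prop := ∀ (text : String) (width_per_char : Int), Dom_longest_word_width text width_per_char → Spec_longest_word_width text width_per_char (longest_word_width text width_per_char)

-- ===== LEMMAS AND PROOFS =====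

-- structural single-space split (proof reference model)
def pvSp : List Char → List (List Char)
  | [] => [[]]
  | c :: r =>
    if c = ' ' then [] :: pvSp r
    else
      match pvSp r with
      | w :: ws => (c :: w) :: ws
      | [] => [[c]]

theorem pvSp_ne_nil (l : List Char) : pvSp l ≠ [] := by
  cases l with
  | nil => simp [pvSp]
  | cons c r =>
    simp only [pvSp]
    split
    · simp
    · split <;> simp

theorem pv_go_eq (sep : List Char) (hsep : sep = [' ']) :
    ∀ (fuel : Nat) (l cur : List Char) (acc : List (List Char)), l.length ≤ fuel →
    PySem.Chars.splitOn.go sep fuel l cur acc =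
      acc.reverse ++ (match pvSp l with
        | w :: ws => (cur.reverse ++ w) :: ws
        | [] => []) := by
  subst hsep
  intro fuel
  induction fuel with
  | zero =>
    intro l cur acc h
    have : l = [] := List.length_eq_zero_iff.mp (Nat.le_zero.mp h)
    subst this
    simp [PySem.Chars.splitOn.go, pvSp]
  | succ n ih =>
    intro l cur acc h
    cases l with
    | nil => simp [PySem.Chars.splitOn.go, pvSp]
    | cons c rest =>
      by_cases hc : c = ' '
      · subst hc
        have hpre : List.isPrefixOf [' '] (' ' :: rest) = true := by
          simp [List.isPrefixOf]
        rw [show PySem.Chars.splitOn.go [' '] (n+1) (' ' :: rest) cur acc =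
            PySem.Chars.splitOn.go [' '] n (List.drop 1 (' ' :: rest)) [] (cur.reverse :: acc) by
          simp [PySem.Chars.splitOn.go, hpre]]
        simp only [List.drop_succ_cons, List.drop_zero]
        rw [ih rest [] (cur.reverse :: acc) (by simpa using Nat.le_of_succ_le_succ h)]
        have := pvSp_ne_nil rest
        cases hsp : pvSp rest with
        | nil => exact absurd hsp this
        | cons w ws => simp [pvSp, hsp]
      · have hpre : List.isPrefixOf [' '] (c :: rest) = false := by
          simp [List.isPrefixOf]
          intro h'; exact absurd h'.symm hc
        rw [show PySem.Chars.splitOn.go [' '] (n+1) (c :: rest) cur acc =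
            PySem.Chars.splitOn.go [' '] n rest (c :: cur) acc by
          simp [PySem.Chars.splitOn.go, hpre]]
        rw [ih rest (c :: cur) acc (by simpa using Nat.le_of_succ_le_succ h)]
        have := pvSp_ne_nil rest
        cases hsp : pvSp rest with
        | nil => exact absurd hsp this
        | cons w ws => simp [pvSp, hc, hsp]

theorem pv_splitOn_space (l : List Char) :
    PySem.Chars.splitOn l [' '] = pvSp l := by
  unfold PySem.Chars.splitOn
  rw [pv_go_eq [' '] rfl (l.length + 1) l [] [] (Nat.le_succ _)]
  have := pvSp_ne_nil l
  cases hsp : pvSp l with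
  | nil => exact absurd hsp this
  | cons w ws => simp

theorem pv_fold_eq (l : List Char) : ∀ (m c : Int) (w ws),
    pvSp l = w :: ws →
    max (l.foldl
      (fun (p : Int × Int) ch => if ch = ' ' then (max p.1 p.2, 0) else (p.1, p.2 + 1)) (m, c)).1
      (l.foldl
      (fun (p : Int × Int) ch => if ch = ' ' then (max p.1 p.2, 0) else (p.1, p.2 + 1)) (m, c)).2 =
    ((c + (w.length : Int)) :: ws.map (fun w => (w.length : Int))).foldl max m := by
  induction l with
  | nil =>
    intro m c w ws hsp
    simp [pvSp] at hsp
    obtain ⟨hw, hws⟩ := hsp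
    subst hw; subst hws
    simp
  | cons ch r ih =>
    intro m c w ws hsp
    by_cases hc : ch = ' '
    · subst hc
      simp only [pvSp] at hsp
      obtain ⟨w', ws', hsp'⟩ : ∃ w' ws', pvSp r = w' :: ws' := by
        cases h : pvSp r with
        | nil => exact absurd h (pvSp_ne_nil r)
        | cons a b => exact ⟨a, b, rfl⟩
      rw [hsp'] at hsp
      obtain ⟨hw, hws⟩ : w = [] ∧ ws = w' :: ws' := by
        constructor <;> · injection hsp with h1 h2; simp_all
      subst hw; subst hws
      simp only [List.foldl_cons, if_pos]
      rw [ih (max m c) 0 w' ws' hsp']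
      simp [List.foldl_cons]
    · simp only [pvSp, if_neg hc] at hsp
      obtain ⟨w', ws', hsp'⟩ : ∃ w' ws', pvSp r = w' :: ws' := by
        cases h : pvSp r with
        | nil => exact absurd h (pvSp_ne_nil r)
        | cons a b => exact ⟨a, b, rfl⟩
      rw [hsp'] at hsp
      obtain ⟨hw, hws⟩ : w = ch :: w' ∧ ws = ws' := by
        constructor <;> · injection hsp with h1 h2; simp_all
      subst hw; subst hws
      simp only [List.foldl_cons, if_neg hc]
      rw [ih m (c + 1) _ _ hsp']
      have : c + ((ch :: w').length : Int) = c + 1 + (w'.length : Int) := by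
        simp; ring
      rw [this]
      simp [List.foldl_cons]

-- ===== VERDICT (by name: the statement is the Claim_ definition above) =====
theorem longest_word_width_spec : Claim_equal_longest_word_width := by
  intro text width_per_char _
  unfold Spec_longest_word_width longest_word_width longest_word_width_alt
  simp only [pv_splitOn_space]
  obtain ⟨w, ws, hsp⟩ : ∃ w ws, pvSp text.toList = w :: ws := by
    cases h : pvSp text.toList with
    | nil => exact absurd h (pvSp_ne_nil _)
    | cons a b => exact ⟨a, b, rfl⟩
  rw [hsp]
  rw [pv_fold_eq text.toList 0 0 w ws hsp]
  simp [List.foldl_cons]
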